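-- pv_equiv track=rewrite | github.com/nwthomas/code-challenges | src/daily-coding-problem/medium/interleave-two-queue/interleave_two_queue.py | interleave_two_lists
-- ===== SOURCE A (Python) =====
-- def interleave_two_lists(num_list):
--     """
--     Takes in a list of numbers and interleaves them with the second half reversed
--     """
--
--     if type(num_list) != list:
--         raise TypeError("The argument for interleave_two_lists must be a list")
--
--     if len(num_list) <= 2:
--         return num_list
--
--     final_list = []
--     left = 0
--     right = len(num_list) - 1
--
--     for _ in range(0, len(num_list) // 2):
--         final_list.append(num_list[left])
--         final_list.append(num_list[right])
--         left += 1
--         right -= 1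
--
--     return final_list
-- ===== SOURCE B (Python) =====
-- def interleave_two_lists(num_list):
--     """
--     Takes in a list of numbers and interleaves them with the second half reversed
--     """
--
--     if type(num_list) != list:
--         raise TypeError("The argument for interleave_two_lists must be a list")
--
--     if len(num_list) <= 2:
--         return num_list
--
--     # Peel the outermost (first, last) pair and keep shrinking the middle;
--     # an odd middle element is dropped when one element remains.
--     out = []
--     mid = num_list
--     while len(mid) >= 2:
--         out.append(mid[0])
--         out.append(mid[-1])
--         mid = mid[1:-1]
--     return out
-- ===== Notes on version B (the rewrite author's own statement) =====
-- stated objective: alternative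
-- what changed: Replaces the two-pointer index loop over range(len//2) with a loop that peels the outermost (first, last) pair off a shrinking middle slice mid = mid[1:-1], consuming the list from both ends instead of tracking indices.
import Mathlib
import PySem

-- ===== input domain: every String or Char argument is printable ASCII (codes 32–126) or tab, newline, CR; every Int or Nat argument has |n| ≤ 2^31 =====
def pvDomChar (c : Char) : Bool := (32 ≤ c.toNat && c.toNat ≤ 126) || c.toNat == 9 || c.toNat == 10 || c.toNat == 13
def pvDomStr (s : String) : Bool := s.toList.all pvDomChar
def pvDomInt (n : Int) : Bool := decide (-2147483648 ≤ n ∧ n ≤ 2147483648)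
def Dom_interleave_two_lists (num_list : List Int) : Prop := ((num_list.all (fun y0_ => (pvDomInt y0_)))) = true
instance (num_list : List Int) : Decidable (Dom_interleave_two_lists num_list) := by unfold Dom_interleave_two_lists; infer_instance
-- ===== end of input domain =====

-- B replaces A's two-pointer index loop with a loop that peels the outermost
-- (first, last) pair off a shrinking middle slice mid[1:-1] (alternative decomposition; not faster).

-- ===== PORT A =====
-- Loop state: (final_list, left, right); indices are always in range, so pyGetD's default 0 is never used.
def interleave_two_lists (num_list : List Int) : List Int :=
  if (num_list.length : Int) ≤ 2 then num_list
  else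
    let st := (PySem.List.pyRange 0 (PySem.Int.floordiv (num_list.length : Int) 2) 1).foldl
      (fun (st : List Int × Int × Int) _ =>
        (st.1 ++ [PySem.List.pyGetD num_list st.2.1 0, PySem.List.pyGetD num_list st.2.2 0],
         st.2.1 + 1, st.2.2 - 1))
      ([], 0, (num_list.length : Int) - 1)
    st.1

-- ===== PORT B =====
-- The while loop, state (out, mid): append mid[0] and mid[-1], shrink mid to mid[1:-1].
def pvPeel (out : List Int) (mid : List Int) : List Int :=
  if h : mid.length < 2 then out
  else
    pvPeel (out ++ [PySem.List.pyGetD mid 0 0, PySem.List.pyGetD mid (-1) 0])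
      (PySem.List.slice mid (some 1) (some (-1)))
termination_by mid.length
decreasing_by
  have hne : mid ≠ [] := by intro e; rw [e] at h; simp at h
  have := PySem.List.length_slice mid (1 : Int) (-1)
  simp [PySem.List.clampIdx, hne] at this
  omega

def interleave_two_lists_alt (num_list : List Int) : List Int :=
  if (num_list.length : Int) ≤ 2 then num_list
  else pvPeel [] num_list

-- ===== PRECONDITION & SPEC =====
def Spec_interleave_two_lists (num_list : List Int) (out : List Int) : Prop := out = interleave_two_lists_alt num_list
instance (num_list : List Int) (out : List Int) : Decidable (Spec_interleave_two_lists num_list out) := by unfold Spec_interleave_two_lists; infer_instance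

-- ===== CLAIM (what is proved, stated in full; the proofs are below) =====
def Claim_equal_interleave_two_lists : Prop := ∀ (num_list : List Int), Dom_interleave_two_lists num_list → Spec_interleave_two_lists num_list (interleave_two_lists num_list)

-- ===== LEMMAS AND PROOFS =====

-- A's loop, run for `ys.length` iterations starting at left index l (and right index n-1-l),
-- appends exactly the zip of the corresponding segments of xs and xs.reverse, interleaved.
theorem foldA (xs : List Int) (ys : List Int) (l : Nat) (acc : List Int)
    (h : l + ys.length ≤ xs.length) :
    (ys.foldl
      (fun (st : List Int × Int × Int) _ =>
        (st.1 ++ [PySem.List.pyGetD xs st.2.1 0, PySem.List.pyGetD xs st.2.2 0],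
         st.2.1 + 1, st.2.2 - 1))
      (acc, (l : Int), (xs.length : Int) - 1 - l)).1
    = acc ++ (((xs.drop l).take ys.length).zip ((xs.reverse.drop l).take ys.length)).flatMap
        (fun p => [p.1, p.2]) := by
  induction ys generalizing l acc with
  | nil => simp
  | cons y ys ih =>
    simp only [List.length_cons] at h
    have hl : l < xs.length := by omega
    have hl' : l < xs.reverse.length := by simpa using hl
    have e1 : PySem.List.pyGetD xs (l : Int) 0 = xs[l] := by
      rw [PySem.List.pyGetD_natCast]; exact List.getD_eq_getElem xs 0 hl
    have e2 : PySem.List.pyGetD xs ((xs.length : Int) - 1 - l) 0 = xs.reverse[l] := by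
      have hc : ((xs.length : Int) - 1 - l) = ((xs.length - 1 - l : Nat) : Int) := by omega
      rw [hc, PySem.List.pyGetD_natCast, List.getElem_reverse]
      exact List.getD_eq_getElem xs 0 (by omega)
    have hstep : ((l : Int) + 1) = ((l + 1 : Nat) : Int) := by push_cast; ring
    have hstep2 : ((xs.length : Int) - 1 - l - 1) = ((xs.length : Int) - 1 - ((l + 1 : Nat) : Int)) := by
      push_cast; ring
    rw [List.foldl_cons]
    simp only [e1, e2, hstep, hstep2]
    rw [ih (l + 1) _ (by omega)]
    have hx : List.take (ys.length + 1) (List.drop l xs)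
        = xs[l] :: List.take ys.length (List.drop (l + 1) xs) := by
      rw [List.drop_eq_getElem_cons hl, List.take_succ_cons]
    have hr : List.take (ys.length + 1) (List.drop l xs.reverse)
        = xs.reverse[l] :: List.take ys.length (List.drop (l + 1) xs.reverse) := by
      rw [List.drop_eq_getElem_cons hl', List.take_succ_cons]
    simp [hx, hr, List.zip_cons_cons, List.getElem_reverse]

-- nums[1:-1] is the list without its first and last element.
theorem slice_one_neg_one (xs : List Int) :
    PySem.List.slice xs (some 1) (some (-1)) = xs.tail.dropLast := by
  simp [PySem.List.slice, PySem.List.clampIdx]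
  cases xs with
  | nil => simp
  | cons x t =>
    simp only [if_neg (by simp : (x :: t : List Int) ≠ [])]
    have h1 : min 1 (x :: t).length = 1 := by simp
    have h2 : ((((x :: t).length : Int) + -1).toNat) = t.length := by simp
    rw [h1, h2]
    simp [List.dropLast_eq_take]

theorem peel_eq (n : Nat) (xs : List Int) (acc : List Int) (hn : xs.length ≤ n) :
    pvPeel acc xs
      = acc ++ ((xs.take (xs.length / 2)).zip (xs.reverse.take (xs.length / 2))).flatMap
          (fun p => [p.1, p.2]) := by
  induction n generalizing xs acc with
  | zero =>
    have : xs = [] := by cases xs <;> simp_all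
    subst this
    rw [pvPeel.eq_def]; simp
  | succ n ih =>
    by_cases h2 : xs.length < 2
    · rw [pvPeel.eq_def]
      simp only [dif_pos h2]
      have : xs.length / 2 = 0 := by omega
      simp [this]
    · obtain ⟨x, t, rfl⟩ : ∃ x t, xs = x :: t := by
        cases xs with
        | nil => simp at h2
        | cons a b => exact ⟨a, b, rfl⟩
      have ht : t ≠ [] := by cases t <;> simp_all
      obtain ⟨ys, y, rfl⟩ := (List.eq_nil_or_concat t).resolve_left ht
      simp only [List.concat_eq_append] at hn h2 ⊢
      rw [pvPeel.eq_def]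
      simp only [dif_neg h2]
      rw [slice_one_neg_one]
      have hm : (x :: (ys ++ [y])).length = ys.length + 2 := by simp
      have e0 : PySem.List.pyGetD (x :: (ys ++ [y])) 0 0 = x := PySem.List.pyGetD_zero_cons ..
      have e1 : PySem.List.pyGetD (x :: (ys ++ [y])) (-1) 0 = y := by
        have : (x :: (ys ++ [y])) = (x :: ys) ++ [y] := by simp
        rw [this]; exact PySem.List.pyGetD_neg_one_append_singleton ..
      have etail : (x :: (ys ++ [y])).tail.dropLast = ys := by simp
      rw [e0, e1, etail, ih ys _ (by simp at hn; omega)]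
      have hk : (x :: (ys ++ [y])).length / 2 = ys.length / 2 + 1 := by rw [hm]; omega
      have h2' : ys.length / 2 ≤ ys.length := Nat.div_le_self ..
      have hrev : (x :: (ys ++ [y])).reverse = y :: (ys.reverse ++ [x]) := by simp
      rw [hk, hrev]
      rw [List.take_succ_cons, List.take_succ_cons,
        List.take_append_of_le_length h2', List.take_append_of_le_length (by simpa using h2'),
        List.zip_cons_cons]
      simp

theorem interleave_two_lists_spec : Claim_equal_interleave_two_lists := by
  intro xs _
  unfold Spec_interleave_two_lists interleave_two_lists interleave_two_lists_alt
  by_cases hle : (xs.length : Int) ≤ 2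
  · simp only [if_pos hle]
  · simp only [if_neg hle]
    have hfd : PySem.Int.floordiv (xs.length : Int) 2 = ((xs.length / 2 : Nat) : Int) := by
      exact_mod_cast PySem.Int.floordiv_natCast xs.length 2
    have hlen : (PySem.List.pyRange 0 ((xs.length / 2 : Nat) : Int) 1).length = xs.length / 2 := by
      rw [PySem.List.length_pyRange_one]; omega
    have hfold := foldA xs (PySem.List.pyRange 0 ((xs.length / 2 : Nat) : Int) 1) 0 []
      (by rw [hlen]; omega)
    simp only [Nat.cast_zero, sub_zero, List.drop_zero, List.nil_append, hlen] at hfold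
    rw [hfd, hfold, peel_eq xs.length xs [] le_rfl]
    simp
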